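-- pv_equiv track=rewrite | github.com/epam/cloud-pipeline | pipe-cli/mount/pipefuse/fuseutils.py | get_parent_paths
-- ===== SOURCE A (Python) =====
-- def get_parent_paths(path, delimiter='/'):
--     current_parent_path = ''
--     for item in get_parent_dirs(path):
--         if current_parent_path:
--             current_parent_path += delimiter + item
--         else:
--             current_parent_path = item
--         yield current_parent_path
--
-- def get_parent_dirs(path, delimiter='/'):
--     items = path.strip(delimiter).split(delimiter)
--     yield ''
--     for item in items[:-1]:
--         yield item
-- ===== SOURCE B (Python) =====
-- def get_parent_paths(path, delimiter='/'):
--     # One generator: the i-th parent is the delimiter-join of the first i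
--     # components of the '/'-stripped-and-split path (i = 0 yields '').
--     items = path.strip('/').split('/')
--     for i in range(len(items)):
--         yield delimiter.join(items[:i])
-- ===== Notes on version B (the rewrite author's own statement) =====
-- stated objective: simpler
-- what changed: Replaced A's pair of chained generators (a helper yielding components and a stateful loop accumulating a running prefix string) with a single loop that yields the i-th parent directly as delimiter.join(items[:i]) over the stripped-and-split path.
import Mathlib
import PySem

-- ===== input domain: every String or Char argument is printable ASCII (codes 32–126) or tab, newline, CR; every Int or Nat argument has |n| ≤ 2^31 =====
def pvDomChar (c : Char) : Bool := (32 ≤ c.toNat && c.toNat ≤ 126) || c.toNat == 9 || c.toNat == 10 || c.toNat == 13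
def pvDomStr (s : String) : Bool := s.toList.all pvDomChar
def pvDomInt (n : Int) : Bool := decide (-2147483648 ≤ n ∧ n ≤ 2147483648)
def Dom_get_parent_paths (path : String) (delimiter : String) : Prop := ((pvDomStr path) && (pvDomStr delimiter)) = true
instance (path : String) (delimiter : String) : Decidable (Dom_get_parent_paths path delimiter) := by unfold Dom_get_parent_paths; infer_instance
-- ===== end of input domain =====

-- B collapses A's two chained generators into one loop that rebuilds each parent
-- prefix by joining a slice (objective: simpler decomposition, same cost class).


-- ===== PORT A =====
-- helper generator: path.strip(delimiter).split(delimiter), yield '' then items[:-1]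
-- (str concatenation / nonemptiness are ported exactly over List Char)
def get_parent_dirs (path : String) (delimiter : String) : List (List Char) :=
  let items := PySem.Chars.splitOn (PySem.Chars.stripChars path.toList delimiter.toList) delimiter.toList
  [] :: items.dropLast

def get_parent_paths (path : String) (delimiter : String) : List String :=
  -- accumulate current_parent_path over get_parent_dirs(path) (helper called with its default '/')
  let step := fun (st : List Char × List String) (item : List Char) =>
    let c := if st.1 ≠ [] then st.1 ++ delimiter.toList ++ item else item
    (c, st.2 ++ [String.ofList c])
  ((get_parent_dirs path "/").foldl step ([], [])).2

-- ===== PORT B =====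
def get_parent_paths_alt (path : String) (delimiter : String) : List String :=
  let items := PySem.Chars.splitOn (PySem.Chars.stripChars path.toList ['/']) ['/']
  (List.range items.length).map (fun i => String.ofList (PySem.Chars.join delimiter.toList (items.take i)))

-- ===== PRECONDITION & SPEC =====
def Spec_get_parent_paths (path : String) (delimiter : String) (out : List String) : Prop := out = get_parent_paths_alt path delimiter
instance (path : String) (delimiter : String) (out : List String) : Decidable (Spec_get_parent_paths path delimiter out) := by unfold Spec_get_parent_paths; infer_instance

-- ===== CLAIM (what is proved, stated in full; the proofs are below) =====
def Claim_equal_get_parent_paths : Prop := ∀ (path : String) (delimiter : String), Dom_get_parent_paths path delimiter → Spec_get_parent_paths path delimiter (get_parent_paths path delimiter)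

-- ===== LEMMAS AND PROOFS =====

-- head of dropWhile fails the predicate
theorem pv_head?_dropWhile {α : Type} (p : α → Bool) (l : List α) {c : α}
    (h : (l.dropWhile p).head? = some c) : p c = false := by
  cases hd : l.dropWhile p with
  | nil => simp [hd] at h
  | cons x xs =>
    have := List.head_dropWhile_not p (l := l) (by simp [hd])
    simp [hd] at this h
    rwa [h] at this

-- the first char of a stripChars result is not a stripped char
theorem pv_stripChars_head (s chars : List Char) {c : Char}
    (h : (PySem.Chars.stripChars s chars).head? = some c) : chars.contains c = false := by
  have h' : ((List.dropWhile (fun c => chars.contains c)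
      (List.dropWhile (fun c => chars.contains c) s).reverse).reverse).head? = some c := h
  rw [List.head?_reverse] at h'
  have hZne : List.dropWhile (fun c => chars.contains c)
      (List.dropWhile (fun c => chars.contains c) s).reverse ≠ [] := by
    intro hz; rw [hz] at h'; simp at h'
  obtain ⟨pre, hpre⟩ :=
    List.dropWhile_suffix (l := (List.dropWhile (fun c => chars.contains c) s).reverse)
      (fun c => chars.contains c)
  have h2 : ((List.dropWhile (fun c => chars.contains c) s).reverse).getLast?
      = (List.dropWhile (fun c => chars.contains c)
          (List.dropWhile (fun c => chars.contains c) s).reverse).getLast? := by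
    conv_lhs => rw [← hpre]
    exact List.getLast?_append_of_ne_nil pre hZne
  rw [← h2, List.getLast?_reverse] at h'
  exact pv_head?_dropWhile _ s h'

-- splitOn.go with accumulator acc prepends acc.reverse
theorem pv_go_acc (sep : List Char) : ∀ (fuel : Nat) (l cur : List Char) (acc : List (List Char)),
    PySem.Chars.splitOn.go sep fuel l cur acc = acc.reverse ++ PySem.Chars.splitOn.go sep fuel l cur [] := by
  intro fuel
  induction fuel with
  | zero => intro l cur acc; simp [PySem.Chars.splitOn.go]
  | succ n ih =>
    intro l cur acc
    cases l with
    | nil => simp [PySem.Chars.splitOn.go]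
    | cons c rest =>
      simp only [PySem.Chars.splitOn.go]
      split
      · rw [ih _ _ (cur.reverse :: acc), ih _ _ [cur.reverse]]
        simp
      · exact ih _ _ acc

-- the first piece of go is nonempty under the stated conditions
theorem pv_go_head (sep : List Char) : ∀ (fuel : Nat) (l cur : List Char),
    (cur ≠ [] ∨ (l ≠ [] ∧ sep.isPrefixOf l = false)) →
    ∃ x rest, PySem.Chars.splitOn.go sep fuel l cur [] = x :: rest ∧ x ≠ [] := by
  intro fuel
  induction fuel with
  | zero =>
    intro l cur h
    refine ⟨cur.reverse ++ l, [], by simp [PySem.Chars.splitOn.go], ?_⟩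
    rcases h with h | ⟨h, _⟩ <;> simp [h]
  | succ n ih =>
    intro l cur h
    cases l with
    | nil =>
      have hc : cur ≠ [] := by rcases h with h | ⟨h, _⟩; exact h; simp at h
      exact ⟨cur.reverse, [], by simp [PySem.Chars.splitOn.go], by simp [hc]⟩
    | cons c rest =>
      simp only [PySem.Chars.splitOn.go]
      split
      · rename_i hpre
        have hc : cur ≠ [] := by
          rcases h with h | ⟨_, h2⟩
          · exact h
          · rw [hpre] at h2; simp at h2
        rw [pv_go_acc]
        refine ⟨cur.reverse,
          PySem.Chars.splitOn.go sep n (List.drop sep.length (c :: rest)) [] [], by simp, by simp [hc]⟩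
      · exact ih rest (c :: cur) (Or.inl (by simp))

-- splitOn of [] is [[]]
theorem pv_splitOn_nil (sep : List Char) : PySem.Chars.splitOn [] sep = [[]] := by
  simp [PySem.Chars.splitOn, PySem.Chars.splitOn.go]

-- the step function of A's loop, at the type the port uses
def pvStep (d : List Char) (st : List Char × List String) (item : List Char) : List Char × List String :=
  let c := if st.1 ≠ [] then st.1 ++ d ++ item else item
  (c, st.2 ++ [String.ofList c])

def pvF (d : List Char) (a x : List Char) : List Char := a ++ d ++ x

theorem pv_foldl_pull (d : List Char) : ∀ (t : List (List Char)) (c b : List Char),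
    c ++ t.foldl (pvF d) b = t.foldl (pvF d) (c ++ b) := by
  intro t
  induction t with
  | nil => intro c b; simp
  | cons x xs ih =>
    intro c b
    simp only [List.foldl_cons, pvF]
    rw [ih]
    simp [List.append_assoc]

theorem pv_join_eq_foldl (d : List Char) : ∀ (t : List (List Char)) (a : List Char),
    PySem.Chars.join d (a :: t) = t.foldl (pvF d) a := by
  intro t
  induction t with
  | nil => intro a; simp [PySem.Chars.join_singleton]
  | cons b t' ih =>
    intro a
    rw [PySem.Chars.join_cons_cons, ih b]
    simp only [List.foldl_cons, pvF]
    rw [pv_foldl_pull]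

theorem pv_loop_inv (d : List Char) : ∀ (l : List (List Char)) (cur : List Char) (out : List String),
    cur ≠ [] →
    (l.foldl (pvStep d) (cur, out)).2
      = out ++ (List.range l.length).map (fun i => String.ofList ((l.take (i+1)).foldl (pvF d) cur)) := by
  intro l
  induction l with
  | nil => intro cur out _; simp
  | cons x xs ih =>
    intro cur out hc
    have hstep : pvStep d (cur, out) x = (cur ++ d ++ x, out ++ [String.ofList (cur ++ d ++ x)]) := by
      simp [pvStep, hc]
    simp only [List.foldl_cons, hstep]
    rw [ih _ _ (by simp [hc])]
    simp only [List.length_cons, List.range_succ_eq_map, List.map_cons, List.map_map]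
    simp [Function.comp, pvF, List.append_assoc]

-- ===== VERDICT (by name: the statement is the Claim_ definition above) =====
theorem get_parent_paths_spec : Claim_equal_get_parent_paths := by
  intro path delimiter _
  unfold Spec_get_parent_paths get_parent_paths get_parent_paths_alt get_parent_dirs
  have hdl : ("/" : String).toList = ['/'] := by decide
  rw [hdl]
  set d := delimiter.toList with hd
  set stripped := PySem.Chars.stripChars path.toList ['/'] with hs
  show (([] :: (PySem.Chars.splitOn stripped ['/']).dropLast).foldl
        (fun st item =>
          let c := if st.1 ≠ [] then st.1 ++ d ++ item else item
          (c, st.2 ++ [String.ofList c])) ([], [])).2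
      = (List.range (PySem.Chars.splitOn stripped ['/']).length).map
          (fun i => String.ofList (PySem.Chars.join d ((PySem.Chars.splitOn stripped ['/']).take i)))
  by_cases hse : stripped = []
  · have hi : PySem.Chars.splitOn stripped ['/'] = [[]] := by rw [hse]; exact pv_splitOn_nil _
    rw [hi]
    simp [PySem.Chars.join, List.intercalate]
  · -- stripped nonempty, its head is not '/'
    obtain ⟨c0, cs, hcons⟩ := List.exists_cons_of_ne_nil hse
    have hhc : (['/'] : List Char).contains c0 = false :=
      pv_stripChars_head path.toList ['/'] (c := c0) (by rw [← hs, hcons]; rfl)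
    have hc0 : c0 ≠ '/' := by intro h; rw [h] at hhc; simp at hhc
    have hnpre : (['/'] : List Char).isPrefixOf stripped = false := by
      rw [hcons]
      simp [List.isPrefixOf]
      exact fun h => hc0 h.symm
    obtain ⟨i0, rest, hitems, hi0⟩ :=
      pv_go_head ['/'] (stripped.length + 1) stripped [] (Or.inr ⟨hse, hnpre⟩)
    have hi : PySem.Chars.splitOn stripped ['/'] = i0 :: rest := hitems
    rw [hi]
    cases rest with
    | nil =>
      simp [PySem.Chars.join, List.intercalate]
    | cons r rs =>
      -- dirs = [] :: i0 :: (r::rs).dropLast ; run two steps by hand then the invariant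
      show ((([] : List Char) :: i0 :: (r :: rs).dropLast).foldl (pvStep d) ([], [])).2 = _
      have h1 : pvStep d ([], []) [] = ([], [""]) := by simp [pvStep]
      have h2 : pvStep d ([], [""]) i0 = (i0, ["", String.ofList i0]) := by
        simp [pvStep]
      simp only [List.foldl_cons, h1, h2]
      rw [pv_loop_inv d _ _ _ hi0]
      have hlen : (r :: rs).dropLast.length = rs.length := by simp
      rw [hlen]
      -- rhs: peel two elements off the range
      simp only [List.length_cons, List.range_succ_eq_map,
        List.map_cons, List.map_map]
      simp only [List.take_zero, List.take_succ_cons, List.take_zero]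
      have hJ0 : PySem.Chars.join d [] = [] := by simp [PySem.Chars.join, List.intercalate]
      have hJ1 : PySem.Chars.join d [i0] = i0 := PySem.Chars.join_singleton d i0
      simp only [hJ0, hJ1, Function.comp_def, List.cons_append, List.nil_append]
      congr 1
      congr 1
      apply List.map_congr_left
      intro i hiR
      have hiR' : i < rs.length := List.mem_range.mp hiR
      have htake : (r :: rs).dropLast.take (i+1) = (r :: rs).take (i+1) := by
        rw [List.dropLast_eq_take, List.take_take]
        congr 1
        simp
        omega
      rw [htake]
      simp only [List.take_succ_cons]
      rw [pv_join_eq_foldl d _ i0]
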